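-- pv_equiv track=rewrite | github.com/drmrd/aoc2024 | solutions/day22.py | first_occurrences
-- ===== SOURCE A (Python) =====
-- def first_occurrences(items, list_):
--     result = {}
--     for item in items:
--         try:
--             result[item] = list_.index(item)
--         except ValueError:
--             continue
--     return result
-- ===== SOURCE B (Python) =====
-- def first_occurrences(items, list_):
--     # Sort (value, index) pairs once, then answer each item by binary search:
--     # ties sort by index, so the first pair with a given value carries its first index.
--     pairs = sorted((v, i) for i, v in enumerate(list_))
--     vals = [v for v, _ in pairs]
--     result = {}
--     for item in items:
--         lo, hi = 0, len(vals)
--         while lo < hi: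
--             mid = (lo + hi) // 2
--             if vals[mid] < item:
--                 lo = mid + 1
--             else:
--                 hi = mid
--         if lo < len(vals) and vals[lo] == item:
--             result[item] = pairs[lo][1]
--     return result
-- ===== Notes on version B (the rewrite author's own statement) =====
-- stated objective: faster
-- what changed: Instead of calling list_.index(item) for every item, B sorts the (value, index) pairs of list_ once and answers each item by binary search over that sorted array (ties keep the smallest index first).
import Mathlib
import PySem

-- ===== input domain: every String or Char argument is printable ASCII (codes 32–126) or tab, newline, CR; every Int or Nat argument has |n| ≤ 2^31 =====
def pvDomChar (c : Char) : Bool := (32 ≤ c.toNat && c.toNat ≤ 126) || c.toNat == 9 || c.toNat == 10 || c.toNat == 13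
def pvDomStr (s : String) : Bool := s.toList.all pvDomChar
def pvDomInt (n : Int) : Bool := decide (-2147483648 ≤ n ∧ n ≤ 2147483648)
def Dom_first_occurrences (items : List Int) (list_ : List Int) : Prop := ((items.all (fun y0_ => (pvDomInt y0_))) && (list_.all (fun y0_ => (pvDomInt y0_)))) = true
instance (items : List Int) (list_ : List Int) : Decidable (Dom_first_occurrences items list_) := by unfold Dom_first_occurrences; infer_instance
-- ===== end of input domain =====

-- B replaces A's per-item list_.index scan by one sort of the (value, index) pairs of list_
-- plus a binary search per item: a different algorithm (sort-then-search) with the same behaviour.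

-- ===== PORT A =====
-- for item in items: try result[item] = list_.index(item) except ValueError: continue
def first_occurrences (items : List Int) (list_ : List Int) : List (Int × Int) :=
  (items.foldl (fun result item =>
      match PySem.List.index? list_ item with
      | some i => result.insert item (i : Int)
      | none => result)
    PySem.Dict.empty).items

-- ===== PORT B =====
-- while lo < hi: mid = (lo + hi) // 2; if vals[mid] < item: lo = mid + 1 else: hi = mid
-- (vals[mid] is always in range when lo < hi ≤ len vals, so getD's default is never read)
def bsearchB (vals : List Int) (item : Int) (lo hi : Nat) : Nat :=
  if lo < hi then
    let mid := (lo + hi) / 2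
    if vals.getD mid 0 < item then bsearchB vals item (mid + 1) hi
    else bsearchB vals item lo mid
  else lo
termination_by hi - lo
decreasing_by all_goals omega

-- pairs = sorted((v, i) for i, v in enumerate(list_)); vals = [v for v, _ in pairs]
-- for item in items: <binary search>; if lo < len(vals) and vals[lo] == item: result[item] = pairs[lo][1]
def first_occurrences_alt (items : List Int) (list_ : List Int) : List (Int × Int) :=
  let pairs := PySem.List.sorted2 ((PySem.List.enumerate list_).map (fun p => (p.2, p.1)))
      (fun q => q.1) (fun q => q.2)
  let vals := pairs.map (fun q => q.1)
  (items.foldl (fun result item =>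
      let lo := bsearchB vals item 0 vals.length
      if lo < vals.length ∧ vals.getD lo 0 = item then result.insert item (pairs.getD lo (0, 0)).2
      else result)
    PySem.Dict.empty).items

-- ===== PRECONDITION & SPEC =====
def Spec_first_occurrences (items : List Int) (list_ : List Int) (out : List (Int × Int)) : Prop := out = first_occurrences_alt items list_
instance (items : List Int) (list_ : List Int) (out : List (Int × Int)) : Decidable (Spec_first_occurrences items list_ out) := by unfold Spec_first_occurrences; infer_instance

-- ===== CLAIM (what is proved, stated in full; the proofs are below) =====
def Claim_equal_first_occurrences : Prop := ∀ (items : List Int) (list_ : List Int), Dom_first_occurrences items list_ → Spec_first_occurrences items list_ (first_occurrences items list_)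

-- ===== LEMMAS AND PROOFS =====

-- lexicographic order on (value, index) pairs — the order Python's tuple sort uses
def lexLe (p q : Int × Int) : Prop := p.1 < q.1 ∨ (p.1 = q.1 ∧ p.2 ≤ q.2)

theorem lexLe_trans {p q r : Int × Int} (h1 : lexLe p q) (h2 : lexLe q r) : lexLe p r := by
  unfold lexLe at *
  rcases h1 with h1 | ⟨e1, l1⟩ <;> rcases h2 with h2 | ⟨e2, l2⟩ <;> [left; left; left; right] <;> omega

theorem insertBy_lex_pairwise (x : Int × Int) (ys : List (Int × Int))
    (h : ys.Pairwise lexLe) :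
    (PySem.List.insertBy
        (fun a b => decide (a.1 < b.1) || (!decide (b.1 < a.1) && decide (a.2 < b.2))) x ys).Pairwise lexLe := by
  induction ys with
  | nil => simp [PySem.List.insertBy]
  | cons y ys ih =>
    rw [List.pairwise_cons] at h
    obtain ⟨hy, hys⟩ := h
    by_cases hb : (decide (x.1 < y.1) || (!decide (y.1 < x.1) && decide (x.2 < y.2))) = true
    · rw [show PySem.List.insertBy _ x (y :: ys) = x :: y :: ys by simp [PySem.List.insertBy, hb]]
      refine List.Pairwise.cons ?_ (List.Pairwise.cons hy hys)
      intro z hz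
      have hxy : lexLe x y := by
        simp only [Bool.or_eq_true, Bool.and_eq_true, Bool.not_eq_true', decide_eq_true_eq, decide_eq_false_iff_not] at hb
        unfold lexLe; omega
      rcases List.mem_cons.mp hz with rfl | hz
      · exact hxy
      · exact lexLe_trans hxy (hy z hz)
    · rw [show PySem.List.insertBy (fun (a b : Int × Int) => decide (a.1 < b.1) || (!decide (b.1 < a.1) && decide (a.2 < b.2))) x (y :: ys) = y :: PySem.List.insertBy (fun (a b : Int × Int) => decide (a.1 < b.1) || (!decide (b.1 < a.1) && decide (a.2 < b.2))) x ys by simp [PySem.List.insertBy, hb]]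
      refine List.Pairwise.cons ?_ (ih hys)
      intro z hz
      rw [PySem.List.mem_insertBy] at hz
      have hyx : lexLe y x := by
        simp only [Bool.or_eq_true, Bool.and_eq_true, Bool.not_eq_true', decide_eq_true_eq, decide_eq_false_iff_not] at hb
        unfold lexLe; omega
      rcases hz with rfl | hz
      · exact hyx
      · exact hy z hz

theorem foldl_insertBy_lex_pairwise (xs : List (Int × Int)) (acc : List (Int × Int))
    (h : acc.Pairwise lexLe) :
    (xs.foldl (fun acc x => PySem.List.insertBy
        (fun a b => decide (a.1 < b.1) || (!decide (b.1 < a.1) && decide (a.2 < b.2))) x acc) acc).Pairwise lexLe := by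
  induction xs generalizing acc with
  | nil => exact h
  | cons x xs ih => exact ih _ (insertBy_lex_pairwise x acc h)

theorem sorted2_lex_pairwise (xs : List (Int × Int)) :
    (PySem.List.sorted2 xs (fun q => q.1) (fun q => q.2)).Pairwise lexLe :=
  foldl_insertBy_lex_pairwise xs [] (by simp)

theorem bsearchB_spec (vals : List Int) (item : Int) (lo hi : Nat)
    (hs : vals.Pairwise (· ≤ ·))
    (hhi : hi ≤ vals.length) (hlohi : lo ≤ hi)
    (h1 : ∀ j (hj : j < vals.length), j < lo → vals[j] < item)
    (h2 : ∀ j (hj : j < vals.length), hi ≤ j → item ≤ vals[j]) :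
    bsearchB vals item lo hi ≤ vals.length ∧
      (∀ j (hj : j < vals.length), j < bsearchB vals item lo hi → vals[j] < item) ∧
      (∀ j (hj : j < vals.length), bsearchB vals item lo hi ≤ j → item ≤ vals[j]) := by
  revert hhi hlohi h1 h2
  induction lo, hi using bsearchB.induct vals item with
  | case1 lo hi hlt mid hm ih =>
    intro hhi hlohi h1 h2
    have hmdef : mid = (lo + hi) / 2 := rfl
    have heq : bsearchB vals item lo hi = bsearchB vals item (mid + 1) hi := by
      rw [bsearchB, if_pos hlt]; simp only [← hmdef, if_pos hm]
    rw [heq]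
    have hmid : mid < vals.length := by omega
    have hg : vals.getD mid 0 = vals[mid] := List.getD_eq_getElem vals 0 hmid
    rw [hg] at hm
    refine ih hhi (by omega) ?_ h2
    intro j hj hjm
    have hp := List.pairwise_iff_getElem.mp hs
    by_cases hje : j = mid
    · subst hje; exact hm
    · exact lt_of_le_of_lt (hp j mid hj hmid (by omega)) hm
  | case2 lo hi hlt mid hm ih =>
    intro hhi hlohi h1 h2
    have hmdef : mid = (lo + hi) / 2 := rfl
    have heq : bsearchB vals item lo hi = bsearchB vals item lo mid := by
      rw [bsearchB, if_pos hlt]; simp only [← hmdef, if_neg hm]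
    rw [heq]
    have hmid : mid < vals.length := by omega
    have hg : vals.getD mid 0 = vals[mid] := List.getD_eq_getElem vals 0 hmid
    rw [hg] at hm
    have hm' := not_lt.mp hm
    refine ih (by omega) (by omega) h1 ?_
    intro j hj hmj
    have hp := List.pairwise_iff_getElem.mp hs
    by_cases hje : mid = j
    · subst hje; exact hm'
    · exact le_trans hm' (hp mid j hmid hj (by omega))
  | case3 lo hi hlt =>
    intro hhi hlohi h1 h2
    rw [bsearchB, if_neg hlt]
    exact ⟨by omega, fun j hj hjlo => h1 j hj hjlo, fun j hj hloj => h2 j hj (by omega)⟩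

-- the sorted pair list holds exactly the (value, index) pairs of list_
theorem mem_pairs_iff (list_ : List Int) (q : Int × Int) :
    q ∈ PySem.List.sorted2 ((PySem.List.enumerate list_).map (fun p => (p.2, p.1)))
        (fun q => q.1) (fun q => q.2) ↔
      ∃ k, ∃ (h : k < list_.length), q = (list_[k], (k : Int)) := by
  rw [(PySem.List.sorted2_perm _ _ _ _).mem_iff, List.mem_map]
  constructor
  · rintro ⟨p, hp, rfl⟩
    rw [PySem.List.mem_enumerate_iff] at hp
    obtain ⟨k, hk, rfl⟩ := hp
    exact ⟨k, hk, by simp⟩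
  · rintro ⟨k, hk, rfl⟩
    exact ⟨((k : Int), list_[k]), (PySem.List.mem_enumerate_iff _ _ _).mpr ⟨k, hk, by simp⟩, rfl⟩

-- per item: B's binary-search lookup returns exactly A's list_.index result
theorem step_eq (list_ : List Int) (item : Int)
    (pairs : List (Int × Int))
    (hp : pairs = PySem.List.sorted2 ((PySem.List.enumerate list_).map (fun p => (p.2, p.1)))
        (fun q => q.1) (fun q => q.2)) :
    (if bsearchB (pairs.map (fun q => q.1)) item 0 (pairs.map (fun q => q.1)).length < (pairs.map (fun q => q.1)).length ∧
         (pairs.map (fun q => q.1)).getD (bsearchB (pairs.map (fun q => q.1)) item 0 (pairs.map (fun q => q.1)).length) 0 = item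
     then some (pairs.getD (bsearchB (pairs.map (fun q => q.1)) item 0 (pairs.map (fun q => q.1)).length) (0, 0)).2
     else none)
      = (PySem.List.index? list_ item).map (fun i => ((i : Nat) : Int)) := by
  have hlex : pairs.Pairwise lexLe := hp ▸ sorted2_lex_pairwise _
  set vals := pairs.map (fun q => q.1) with hv
  have hvpw : vals.Pairwise (· ≤ ·) := by
    rw [hv, List.pairwise_map]
    exact hlex.imp (by intro a b h; rcases h with h | ⟨h, _⟩ <;> omega)
  set lo := bsearchB vals item 0 vals.length with hlo
  obtain ⟨hle, hlt, hge⟩ := bsearchB_spec vals item 0 vals.length hvpw le_rfl (Nat.zero_le _)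
    (fun j hj h => absurd h (by omega)) (fun j hj h => absurd h (by omega))
  have hmem_pairs : ∀ q ∈ pairs, ∃ k, ∃ (h : k < list_.length), q = (list_[k], (k : Int)) := by
    intro q hq; exact (mem_pairs_iff list_ q).mp (hp ▸ hq)
  by_cases hmem : item ∈ list_
  · obtain ⟨k, hik⟩ : ∃ k, PySem.List.index? list_ item = some k :=
      Option.isSome_iff_exists.mp ((PySem.List.index?_isSome_iff list_ item).mpr hmem)
    obtain ⟨hk, hkv, hkmin⟩ := PySem.List.getElem_of_index?_eq_some hik
    have hinpairs : (item, (k : Int)) ∈ pairs := by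
      rw [hp, mem_pairs_iff]; exact ⟨k, hk, by rw [hkv]⟩
    obtain ⟨pos, hpos, hposval⟩ := List.getElem_of_mem hinpairs
    have hvalpos : vals[pos]'(by simpa [hv] using hpos) = item := by
      simp [hv, hposval]
    have hlopos : lo ≤ pos := by
      by_contra hcon
      have := hlt pos (by simpa [hv] using hpos) (by omega)
      omega
    have hlolen : lo < vals.length := by
      have : pos < vals.length := by simpa [hv] using hpos
      omega
    have hvallo : vals[lo] = item := by
      have h1 : item ≤ vals[lo] := hge lo hlolen le_rfl
      have h2 : vals[lo] ≤ vals[pos]'(by simpa [hv] using hpos) := by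
        rcases Nat.lt_or_ge lo pos with hlt' | hge'
        · exact List.pairwise_iff_getElem.mp hvpw lo pos hlolen (by simpa [hv] using hpos) hlt'
        · have : lo = pos := by omega
          subst this; exact le_rfl
      omega
    have hlopairs : lo < pairs.length := by simpa [hv] using hlolen
    have hfst : (pairs[lo]'hlopairs).1 = item := by
      have : vals[lo] = (pairs[lo]'hlopairs).1 := by simp [hv]
      omega
    have hsnd : (pairs[lo]'hlopairs).2 = (k : Int) := by
      obtain ⟨k', hk', hqe⟩ := hmem_pairs (pairs[lo]'hlopairs) (List.getElem_mem hlopairs)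
      have hvk' : list_[k'] = item := by rw [hqe] at hfst; exact hfst
      have hkk' : k ≤ k' := by
        by_contra hcon
        exact hkmin k' (by omega) hvk'
      have hk'k : (pairs[lo]'hlopairs).2 ≤ (k : Int) := by
        rcases Nat.lt_or_ge lo pos with hlt' | hge'
        · have hlx := List.pairwise_iff_getElem.mp hlex lo pos hlopairs hpos hlt'
          rw [hposval] at hlx
          rcases hlx with h | ⟨_, h⟩
          · rw [hfst] at h; omega
          · exact h
        · have : lo = pos := by omega
          subst this; rw [hposval]
      rw [hqe] at hk'k ⊢
      simp at hk'k ⊢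
      omega
    rw [hik, if_pos ⟨hlolen, by rw [List.getD_eq_getElem vals 0 hlolen]; exact hvallo⟩]
    rw [List.getD_eq_getElem pairs (0,0) hlopairs]
    simp [hsnd]
  · rw [(PySem.List.index?_eq_none_iff list_ item).mpr hmem]
    rw [if_neg]
    · rfl
    · rintro ⟨hlolen, hvd⟩
      rw [List.getD_eq_getElem vals 0 hlolen] at hvd
      have hlopairs : lo < pairs.length := by simpa [hv] using hlolen
      obtain ⟨k', hk', hqe⟩ := hmem_pairs (pairs[lo]'hlopairs) (List.getElem_mem hlopairs)
      have : vals[lo] = (pairs[lo]'hlopairs).1 := by simp [hv]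
      rw [hqe] at this
      simp at this
      exact hmem (by rw [← hvd, this]; exact List.getElem_mem hk')

-- ===== VERDICT (by name: the statement is the Claim_ definition above) =====
theorem first_occurrences_spec : Claim_equal_first_occurrences := by
  intro items list_ _
  unfold Spec_first_occurrences first_occurrences first_occurrences_alt
  simp only []
  congr 1
  apply PySem.List.foldl_congr_mem
  intro r item _
  have h := step_eq list_ item _ rfl
  by_cases hg : bsearchB ((PySem.List.sorted2 ((PySem.List.enumerate list_).map (fun p => (p.2, p.1))) (fun q => q.1) (fun q => q.2)).map (fun q => q.1)) item 0 ((PySem.List.sorted2 ((PySem.List.enumerate list_).map (fun p => (p.2, p.1))) (fun q => q.1) (fun q => q.2)).map (fun q => q.1)).length < ((PySem.List.sorted2 ((PySem.List.enumerate list_).map (fun p => (p.2, p.1))) (fun q => q.1) (fun q => q.2)).map (fun q => q.1)).length ∧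
      ((PySem.List.sorted2 ((PySem.List.enumerate list_).map (fun p => (p.2, p.1))) (fun q => q.1) (fun q => q.2)).map (fun q => q.1)).getD (bsearchB ((PySem.List.sorted2 ((PySem.List.enumerate list_).map (fun p => (p.2, p.1))) (fun q => q.1) (fun q => q.2)).map (fun q => q.1)) item 0 ((PySem.List.sorted2 ((PySem.List.enumerate list_).map (fun p => (p.2, p.1))) (fun q => q.1) (fun q => q.2)).map (fun q => q.1)).length) 0 = item
  · rw [if_pos hg] at h
    cases hidx : PySem.List.index? list_ item with
    | none => rw [hidx] at h; simp at h
    | some k =>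
      rw [hidx] at h
      simp only [Option.map_some, Option.some_inj] at h
      rw [if_pos hg, h]
  · rw [if_neg hg] at h
    cases hidx : PySem.List.index? list_ item with
    | none => rw [if_neg hg]
    | some k => rw [hidx] at h; simp at h
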